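-- pv_equiv track=rewrite | github.com/Greenpaul11/Python_Projects | CHECKERS_PYGAME/checkers/checkers_players.py | count_checkers
-- ===== SOURCE A (Python) =====
-- def count_checkers(board):
--     white = 0
--     black = 0
--     for each in board:
--         if each[1] == 'white' or each[1] == 'white queen':
--             white += 1
--         elif each[1] == 'black' or each[1] == 'black queen':
--             black += 1
--     return str(white), str(black)
-- ===== SOURCE B (Python) =====
-- def count_checkers(board):
--     # Staged passes: project out the color tags, then count each tag separately.
--     keys = [each[1] for each in board]
--     white = keys.count('white') + keys.count('white queen')
--     black = keys.count('black') + keys.count('black queen')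
--     return str(white), str(black)
-- ===== Notes on version B (the rewrite author's own statement) =====
-- stated objective: idiomatic
-- what changed: Replaces A's single pass with per-element if/elif branching and two running counters by staged passes: first project out the color tags, then compute each total with branch-free list.count calls per tag.
-- outside the precondition, e.g. on count_checkers([['a'], ['b', 'white']]): A raises IndexError, B raises IndexError
import Mathlib
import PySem

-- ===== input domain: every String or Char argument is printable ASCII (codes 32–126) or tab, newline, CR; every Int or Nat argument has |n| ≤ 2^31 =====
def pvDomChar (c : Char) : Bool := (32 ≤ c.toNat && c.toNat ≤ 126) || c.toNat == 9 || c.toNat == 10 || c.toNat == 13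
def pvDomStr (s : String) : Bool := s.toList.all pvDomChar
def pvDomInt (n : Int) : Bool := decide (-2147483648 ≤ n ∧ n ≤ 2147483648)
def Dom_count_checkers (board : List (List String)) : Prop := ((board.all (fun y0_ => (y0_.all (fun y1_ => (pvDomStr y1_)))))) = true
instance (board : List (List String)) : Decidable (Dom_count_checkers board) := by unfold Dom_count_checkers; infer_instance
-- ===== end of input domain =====

-- B replaces A's branching one-pass tally by staged passes: project the color tags, then count each tag with list.count.
-- Both programs raise IndexError on a board element of length < 2 (each[1]); Pre_ excludes exactly those.

-- ===== PORT A =====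
def count_checkers (board : List (List String)) : String × String :=
  let wb := board.foldl (fun (wb : Int × Int) each =>
    let k := (PySem.List.pyGet? each 1).getD ""   -- each[1]; under Pre_ the index is in range
    if k = "white" ∨ k = "white queen" then (wb.1 + 1, wb.2)
    else if k = "black" ∨ k = "black queen" then (wb.1, wb.2 + 1)
    else wb) (0, 0)
  (PySem.Int.toStr wb.1, PySem.Int.toStr wb.2)

-- ===== PORT B =====
def count_checkers_alt (board : List (List String)) : String × String :=
  let keys := board.map (fun each => (PySem.List.pyGet? each 1).getD "")  -- each[1]; under Pre_ in range
  let white : Int := PySem.List.count keys "white" + PySem.List.count keys "white queen"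
  let black : Int := PySem.List.count keys "black" + PySem.List.count keys "black queen"
  (PySem.Int.toStr white, PySem.Int.toStr black)

-- ===== PRECONDITION & SPEC =====
-- Pre_: every board element has length ≥ 2 (each[1] raises IndexError otherwise, in A and in B alike).
def Pre_count_checkers (board : List (List String)) : Prop :=
  ∀ each ∈ board, 2 ≤ each.length
instance (board : List (List String)) : Decidable (Pre_count_checkers board) := by unfold Pre_count_checkers; infer_instance
def pvWitness_count_checkers : List (List String) := [["p1", "white"], ["p2", "black queen"], ["p3", "empty"]]

def Spec_count_checkers (board : List (List String)) (out : String × String) : Prop := out = count_checkers_alt board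
instance (board : List (List String)) (out : String × String) : Decidable (Spec_count_checkers board out) := by unfold Spec_count_checkers; infer_instance

-- ===== CLAIM (what is proved, stated in full; the proofs are below) =====
def Claim_equal_count_checkers : Prop := ∀ (board : List (List String)), Dom_count_checkers board → Pre_count_checkers board → Spec_count_checkers board (count_checkers board)

-- ===== LEMMAS AND PROOFS =====

-- key of a board element (each[1], with "" as the out-of-range placeholder never hit under Pre_;
-- written as the literal lambda so it matches B's map syntactically)
-- A's loop computes the two color counts
lemma foldA_count : ∀ (l : List (List String)) (w b : Int),
    l.foldl (fun (wb : Int × Int) each =>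
        let k := (PySem.List.pyGet? each 1).getD ""
        if k = "white" ∨ k = "white queen" then (wb.1 + 1, wb.2)
        else if k = "black" ∨ k = "black queen" then (wb.1, wb.2 + 1)
        else wb) (w, b)
      = (w + ((l.map (fun each => (PySem.List.pyGet? each 1).getD "")).count "white" + (l.map (fun each => (PySem.List.pyGet? each 1).getD "")).count "white queen" : Int),
         b + ((l.map (fun each => (PySem.List.pyGet? each 1).getD "")).count "black" + (l.map (fun each => (PySem.List.pyGet? each 1).getD "")).count "black queen" : Int)) := by
  intro l
  induction l with
  | nil => intro w b; simp
  | cons e t ih =>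
    intro w b
    simp only [List.foldl_cons, List.map_cons, List.count_cons]
    by_cases h1 : (PySem.List.pyGet? e 1).getD "" = "white" ∨ (PySem.List.pyGet? e 1).getD "" = "white queen"
    · rcases h1 with h | h <;> rw [h] <;> simp [ih] <;> ring
    · by_cases h2 : (PySem.List.pyGet? e 1).getD "" = "black" ∨ (PySem.List.pyGet? e 1).getD "" = "black queen"
      · rcases h2 with h | h <;> rw [h] <;> simp_all <;> ring
      · push Not at h1 h2
        simp_all [beq_iff_eq]

-- ===== VERDICT (by name: the statement is the Claim_ definition above) =====
theorem count_checkers_spec : Claim_equal_count_checkers := by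
  intro board _ _
  unfold Spec_count_checkers count_checkers count_checkers_alt
  simp only [foldA_count, PySem.List.count_eq, zero_add]
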